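-- pv_equiv track=rewrite | github.com/gmartakis/file-handling | file.py | find
-- ===== SOURCE A (Python) =====
-- def find(needle,haystack):
--   if needle == haystack: return []
--   # Strings are iterable, too
--   if isinstance(haystack,str) and len(haystack)<=1: return None
--   try:
--     for i,e in enumerate(haystack):
--       r = find(needle,e)
--       if r is not None:
--         r.insert(0,i)
--         return r
--   except TypeError:
--     pass
--   return None
-- ===== SOURCE B (Python) =====
-- def find(needle, haystack):
--     # Iterative DFS with an explicit stack instead of recursion.
--     stack = [(haystack, [])]
--     while stack:
--         node, path = stack.pop()
--         if needle == node:
--             return path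
--         # Strings are iterable, too
--         if isinstance(node, str) and len(node) <= 1:
--             continue
--         try:
--             children = list(enumerate(node))
--         except TypeError:
--             continue
--         for i, child in reversed(children):
--             stack.append((child, path + [i]))
--     return None
-- ===== Notes on version B (the rewrite author's own statement) =====
-- stated objective: alternative
-- what changed: Replaced the recursive DFS with an explicit stack-based iteration: nodes are pushed with their index paths (children in reverse order to keep preorder first-match), so there is no recursion and no mutating insert(0,i) path construction.
import Mathlib
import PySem

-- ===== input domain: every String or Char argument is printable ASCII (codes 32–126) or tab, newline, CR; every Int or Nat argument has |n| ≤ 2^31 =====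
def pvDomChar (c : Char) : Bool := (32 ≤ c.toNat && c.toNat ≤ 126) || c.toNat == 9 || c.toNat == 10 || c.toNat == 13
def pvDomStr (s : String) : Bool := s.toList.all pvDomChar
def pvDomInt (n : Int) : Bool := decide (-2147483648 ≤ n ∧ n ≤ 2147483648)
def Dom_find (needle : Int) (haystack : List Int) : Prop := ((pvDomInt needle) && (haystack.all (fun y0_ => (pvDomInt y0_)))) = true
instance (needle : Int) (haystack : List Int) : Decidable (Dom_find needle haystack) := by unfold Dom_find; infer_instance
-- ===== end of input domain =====

-- B replaces the recursive DFS with an explicit stack-based search (same preorder first-match);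
-- on this task's domain (an int needle, a flat list of ints) both return the first index as a
-- singleton path, or none.

-- ===== PORT A =====
-- Inner recursive call find(needle, e) where e is an Int: 'needle == e' may return [];
-- the str guard is False; iterating an int raises TypeError, caught -> returns None.
def findInt (needle e : Int) : Option (List Int) :=
  if needle = e then some [] else none

-- The 'for i, e in enumerate(haystack)' loop of A, carrying the running index i.
def findLoop (needle : Int) : Int → List Int → Option (List Int)
  | _, [] => none
  | i, e :: rest =>
    match findInt needle e with
    | some r => some (i :: r)   -- r.insert(0, i); return r
    | none => findLoop needle (i + 1) rest

def find (needle : Int) (haystack : List Int) : Option (List Int) :=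
  -- 'needle == haystack' compares an int with a list: always False here.
  -- 'isinstance(haystack, str)': False, haystack is a list.
  findLoop needle 0 haystack

-- ===== PORT B =====
-- A stack entry's node is either the whole haystack list or one of its int elements.
inductive BNode where
  | leaf : Int → BNode
  | top : List Int → BNode
deriving DecidableEq, Repr

-- 'needle == node': an int equals a list never, so only leaves can match.
def beqNode (needle : Int) : BNode → Bool
  | .leaf v => needle = v
  | .top _ => false

def nodeSize : BNode → Nat
  | .leaf _ => 1
  | .top xs => xs.length + 1

def stackSize (st : List (BNode × List Int)) : Nat :=
  (st.map (fun p => nodeSize p.1)).sum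

-- 'for i, child in reversed(list(enumerate(node))): stack.append((child, path + [i]))'
-- pushing in reverse index order puts the children, in order, on top of the stack.
def pushChildren (path : List Int) (i : Int) : List Int → List (BNode × List Int)
  | [] => []
  | e :: rest => (BNode.leaf e, path ++ [i]) :: pushChildren path (i + 1) rest

theorem stackSize_pushChildren (path : List Int) (i : Int) (xs : List Int) :
    stackSize (pushChildren path i xs) = xs.length := by
  induction xs generalizing i with
  | nil => rfl
  | cons e rest ih =>
    simp only [pushChildren, stackSize, nodeSize, List.map_cons, List.sum_cons, List.length_cons] at *
    rw [ih]; omega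

theorem stackSize_append (a b : List (BNode × List Int)) :
    stackSize (a ++ b) = stackSize a + stackSize b := by
  simp [stackSize]

-- The 'while stack:' loop: pop, test equality, skip string guard, enumerate or skip a leaf.
def bloop (needle : Int) : List (BNode × List Int) → Option (List Int)
  | [] => none
  | (n, path) :: rest =>
    if beqNode needle n then some path
    else
      match n with
      | .leaf _ => bloop needle rest          -- iterating an int raises TypeError: continue
      | .top xs => bloop needle (pushChildren path 0 xs ++ rest)
termination_by st => stackSize st
decreasing_by
  · simp [stackSize, nodeSize]
  · have h := stackSize_pushChildren path 0 xs
    simp only [stackSize_append, h]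
    simp [stackSize, nodeSize]

def find_alt (needle : Int) (haystack : List Int) : Option (List Int) :=
  bloop needle [(BNode.top haystack, [])]

-- ===== PRECONDITION & SPEC =====
def Spec_find (needle : Int) (haystack : List Int) (out : Option (List Int)) : Prop := out = find_alt needle haystack
instance (needle : Int) (haystack : List Int) (out : Option (List Int)) : Decidable (Spec_find needle haystack out) := by unfold Spec_find; infer_instance

-- ===== CLAIM (what is proved, stated in full; the proofs are below) =====
def Claim_equal_find : Prop := ∀ (needle : Int) (haystack : List Int), Dom_find needle haystack → Spec_find needle haystack (find needle haystack)

-- ===== LEMMAS AND PROOFS =====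

-- The stack loop on a block of leaves realises A's indexed scan.
theorem bloop_leaves (needle : Int) (xs : List Int) (i : Int)
    (rest : List (BNode × List Int)) :
    bloop needle (pushChildren [] i xs ++ rest) =
      match findLoop needle i xs with
      | some r => some r
      | none => bloop needle rest := by
  induction xs generalizing i with
  | nil => simp [pushChildren, findLoop]
  | cons e tail ih =>
    by_cases h : needle = e
    · simp [pushChildren, bloop, beqNode, findLoop, findInt, h]
    · simp [pushChildren, bloop, beqNode, findLoop, findInt, h, ih]

theorem find_eq_find_alt (needle : Int) (haystack : List Int) :
    find needle haystack = find_alt needle haystack := by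
  have h := bloop_leaves needle haystack 0 []
  simp only [find, find_alt, bloop, beqNode, Bool.false_eq_true, if_false]
  rw [h]
  cases findLoop needle 0 haystack <;> simp [bloop]

-- ===== VERDICT (by name: the statement is the Claim_ definition above) =====
theorem find_spec : Claim_equal_find := by
  intro needle haystack _
  exact find_eq_find_alt needle haystack
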